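-- pv_equiv track=rewrite | github.com/johndoe31415/x509sak | x509sak/PassphraseGenerator.py | max_digits_in_radix
-- ===== SOURCE A (Python) =====
-- def max_digits_in_radix(bits, new_radix):
-- 	assert(bits > 0)
-- 	maxvalue = 2 ** bits
-- 	length = 1
-- 	curvalue = new_radix
-- 	while curvalue < maxvalue:
-- 		length += 1
-- 		curvalue *= new_radix
-- 	return length
-- ===== SOURCE B (Python) =====
-- def max_digits_in_radix(bits, new_radix):
-- 	assert(bits > 0)
-- 	maxvalue = 2 ** bits
-- 	blr = new_radix.bit_length()
-- 	# 2**(blr-1) <= new_radix < 2**blr, so the answer lies in [ceil(bits/blr), ceil(bits/(blr-1))]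
-- 	lo = (bits + blr - 1) // blr
-- 	hi = (bits + blr - 2) // (blr - 1)
-- 	# binary search for the least length L with new_radix ** L >= maxvalue
-- 	while lo < hi:
-- 		mid = (lo + hi) // 2
-- 		if new_radix ** mid < maxvalue:
-- 			lo = mid + 1
-- 		else:
-- 			hi = mid
-- 	return lo
-- ===== Notes on version B (the rewrite author's own statement) =====
-- stated objective: faster
-- what changed: Replaces A's one-multiplication-per-digit loop (building the full power incrementally) with a bit_length-derived bracket [ceil(bits/blr), ceil(bits/(blr-1))] followed by binary search on the length, testing each candidate length with a single fast builtin pow.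
-- outside the precondition, e.g. on max_digits_in_radix(3, 1): A does not finish within the time limit, B raises ZeroDivisionError; on max_digits_in_radix(3, -2): A returns 4, B returns 3; on max_digits_in_radix(0, 10): A raises AssertionError, B raises AssertionError
import Mathlib
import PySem

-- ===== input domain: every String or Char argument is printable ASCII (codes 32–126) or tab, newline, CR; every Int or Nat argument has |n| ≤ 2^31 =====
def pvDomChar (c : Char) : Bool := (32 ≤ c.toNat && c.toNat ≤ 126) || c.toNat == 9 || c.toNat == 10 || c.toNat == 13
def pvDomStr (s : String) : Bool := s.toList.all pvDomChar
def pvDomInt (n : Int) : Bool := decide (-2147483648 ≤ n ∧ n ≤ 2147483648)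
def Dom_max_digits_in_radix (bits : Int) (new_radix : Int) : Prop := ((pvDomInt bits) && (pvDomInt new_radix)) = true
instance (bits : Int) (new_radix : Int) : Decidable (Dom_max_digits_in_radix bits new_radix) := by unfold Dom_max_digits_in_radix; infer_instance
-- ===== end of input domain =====

-- B replaces A's one-by-one multiplication loop by exponential search plus binary search on the
-- length, testing each candidate with a single fast power (objective: faster, asymptotically).

-- ===== PORT A =====
-- the while loop of A; fuel bounds the iterations (on Pre_ inputs bits.toNat iterations suffice)
def maxLoopA (new_radix maxvalue : Int) : Nat → Int → Int → Int
  | 0, length, _ => length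
  | f + 1, length, curvalue =>
    if curvalue < maxvalue then maxLoopA new_radix maxvalue f (length + 1) (curvalue * new_radix)
    else length

def max_digits_in_radix (bits : Int) (new_radix : Int) : Int :=
  maxLoopA new_radix (2 ^ bits.toNat) bits.toNat 1 new_radix

-- ===== PORT B =====
-- B's while loop: binary search for the least L with new_radix ** L >= maxvalue
def binSearchB (new_radix maxvalue : Int) : Nat → Int → Int → Int
  | 0, lo, _ => lo
  | f + 1, lo, hi =>
    if lo < hi then
      let mid := PySem.Int.floordiv (lo + hi) 2
      if new_radix ^ mid.toNat < maxvalue then binSearchB new_radix maxvalue f (mid + 1) hi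
      else binSearchB new_radix maxvalue f lo mid
    else lo

def max_digits_in_radix_alt (bits : Int) (new_radix : Int) : Int :=
  let maxvalue := 2 ^ bits.toNat
  let blr : Int := (PySem.Int.bitLength new_radix : Int)
  let lo := PySem.Int.floordiv (bits + blr - 1) blr
  let hi := PySem.Int.floordiv (bits + blr - 2) (blr - 1)
  binSearchB new_radix maxvalue (hi - lo).toNat lo hi

-- ===== PRECONDITION & SPEC =====
-- Pre_ excludes bits ≤ 0 (A's assert raises), radices -1..1 (A's loop never terminates), and
-- negative radices ≤ -2 (a nonsense base, where A's returned value — the first power that is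
-- ≥ 2^bits, reachable only at even exponents — is an artefact of sign alternation).
def Pre_max_digits_in_radix (bits : Int) (new_radix : Int) : Prop := 1 ≤ bits ∧ 2 ≤ new_radix
instance (bits : Int) (new_radix : Int) : Decidable (Pre_max_digits_in_radix bits new_radix) := by
  unfold Pre_max_digits_in_radix; infer_instance

def pvWitness_max_digits_in_radix : Int × Int := (8, 10)

def Spec_max_digits_in_radix (bits : Int) (new_radix : Int) (out : Int) : Prop :=
  out = max_digits_in_radix_alt bits new_radix
instance (bits : Int) (new_radix : Int) (out : Int) : Decidable (Spec_max_digits_in_radix bits new_radix out) := by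
  unfold Spec_max_digits_in_radix; infer_instance

-- ===== CLAIM (what is proved, stated in full; the proofs are below) =====
def Claim_equal_max_digits_in_radix : Prop := ∀ (bits : Int) (new_radix : Int), Dom_max_digits_in_radix bits new_radix → Pre_max_digits_in_radix bits new_radix → Spec_max_digits_in_radix bits new_radix (max_digits_in_radix bits new_radix)

-- ===== LEMMAS AND PROOFS =====

-- monotonicity of Int powers for base ≥ 1
theorem pvPowMono {r : Int} (hr : 1 ≤ r) {a b : Nat} (h : a ≤ b) : r ^ a ≤ r ^ b :=
  pow_le_pow_right₀ hr h

-- A's loop computes K+1 where K = least k with maxvalue ≤ r^(k+1)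
theorem maxLoopA_eq (r M : Int) (hex : ∃ k, M ≤ r ^ (k + 1)) :
    ∀ (f j : Nat), j ≤ Nat.find hex → Nat.find hex ≤ j + f →
      maxLoopA r M f ((j : Int) + 1) (r ^ (j + 1)) = (Nat.find hex : Int) + 1 := by
  intro f
  induction f with
  | zero =>
    intro j h1 h2
    have : j = Nat.find hex := by omega
    simp [maxLoopA, this]
  | succ f ih =>
    intro j h1 h2
    by_cases hg : r ^ (j + 1) < M
    · have hne : j ≠ Nat.find hex := by
        intro he
        have := Nat.find_spec hex
        rw [← he] at this
        omega
      have hj : j + 1 ≤ Nat.find hex := by omega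
      have := ih (j + 1) hj (by omega)
      simp only [maxLoopA, if_pos hg]
      have harg : ((j : Int) + 1) + 1 = ((j + 1 : Nat) : Int) + 1 := by push_cast; ring
      have harg2 : r ^ (j + 1) * r = r ^ (j + 1 + 1) := by ring
      rw [harg, harg2, this]
    · have hK : Nat.find hex ≤ j := Nat.find_le (h := hex) (by omega)
      have hje : j = Nat.find hex := by omega
      subst hje
      simp only [maxLoopA]
      rw [if_neg hg]

-- B's binary search finds exactly K+1 inside [lo, hi]
theorem binSearchB_eq (r M : Int) (hr : 2 ≤ r) (hex : ∃ k, M ≤ r ^ (k + 1)) :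
    ∀ (f : Nat) (lo hi : Int), 1 ≤ lo → lo ≤ (Nat.find hex : Int) + 1 →
      (Nat.find hex : Int) + 1 ≤ hi → hi - lo < 2 ^ f →
      binSearchB r M f lo hi = (Nat.find hex : Int) + 1 := by
  intro f
  induction f with
  | zero =>
    intro lo hi h1 h2 h3 h4
    have : lo = (Nat.find hex : Int) + 1 := by omega
    simp [binSearchB, this]
  | succ f ih =>
    intro lo hi h1 h2 h3 h4
    by_cases hlt : lo < hi
    · have hfd : PySem.Int.floordiv (lo + hi) 2 = (lo + hi) / 2 :=
        PySem.Int.floordiv_eq_ediv_of_pos (by norm_num)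
      set mid := (lo + hi) / 2 with hmid
      have hml : lo ≤ mid := by omega
      have hmh : mid < hi := by omega
      have hpow : (2 : Int) ^ (f + 1) = 2 ^ f * 2 := by ring
      rw [hpow] at h4
      simp only [binSearchB, if_pos hlt, hfd]
      by_cases hg : r ^ mid.toNat < M
      · have hmK : mid < (Nat.find hex : Int) + 1 := by
          by_contra hc
          push Not at hc
          have hn : Nat.find hex + 1 ≤ mid.toNat := by omega
          have := calc M ≤ r ^ (Nat.find hex + 1) := Nat.find_spec hex
            _ ≤ r ^ mid.toNat := pvPowMono (by omega) hn
          omega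
        rw [if_pos hg]
        exact ih (mid + 1) hi (by omega) (by omega) h3 (by omega)
      · have hKm : (Nat.find hex : Int) + 1 ≤ mid := by
          have hm1 : 1 ≤ mid := by omega
          have hP : M ≤ r ^ (mid.toNat - 1 + 1) := by
            have : mid.toNat - 1 + 1 = mid.toNat := by omega
            rw [this]; omega
          have := Nat.find_le (h := hex) hP
          omega
        rw [if_neg hg]
        exact ih lo mid h1 h2 hKm (by omega)
    · have hle : lo = (Nat.find hex : Int) + 1 := by omega
      simp only [binSearchB]
      rw [if_neg hlt]
      exact hle

-- ===== VERDICT (by name: the statement is the Claim_ definition above) =====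
theorem max_digits_in_radix_spec : Claim_equal_max_digits_in_radix := by
  intro bits new_radix _ hpre
  obtain ⟨hb, hr⟩ := hpre
  unfold Spec_max_digits_in_radix max_digits_in_radix max_digits_in_radix_alt
  set b := bits.toNat with hbdef
  have hb1 : 1 ≤ b := by omega
  have hbits : (b : Int) = bits := Int.toNat_of_nonneg (by omega)
  set M : Int := 2 ^ b with hMdef
  have hex : ∃ k, M ≤ new_radix ^ (k + 1) := by
    refine ⟨b - 1, ?_⟩
    have : b - 1 + 1 = b := by omega
    rw [this, hMdef]
    exact pow_le_pow_left₀ (by norm_num) hr _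
  -- A's side
  have hKle : Nat.find hex ≤ b := by
    have hP : M ≤ new_radix ^ (b - 1 + 1) := by
      have : b - 1 + 1 = b := by omega
      rw [this, hMdef]
      exact pow_le_pow_left₀ (by norm_num) hr _
    have := Nat.find_le (h := hex) hP
    omega
  have hA : maxLoopA new_radix M b 1 new_radix = (Nat.find hex : Int) + 1 := by
    have := maxLoopA_eq new_radix M hex b 0 (by omega) (by omega)
    simpa using this
  -- B's side: bit-length bracket
  set L := PySem.Int.bitLength new_radix with hLdef
  have hrnn : (0 : Int) ≤ new_radix := by omega
  have hub : new_radix < 2 ^ L := by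
    have h1 := PySem.Int.lt_two_pow_bitLength new_radix
    have h2 : (new_radix.natAbs : Int) = new_radix := Int.natAbs_of_nonneg hrnn
    calc new_radix = (new_radix.natAbs : Int) := h2.symm
      _ < ((2 ^ L : Nat) : Int) := by exact_mod_cast h1
      _ = 2 ^ L := by push_cast; ring
  have hlb : (2 : Int) ^ (L - 1) ≤ new_radix := by
    have h1 := PySem.Int.two_pow_bitLength_le (n := new_radix) (by omega)
    have h2 : (new_radix.natAbs : Int) = new_radix := Int.natAbs_of_nonneg hrnn
    calc (2 : Int) ^ (L - 1) = ((2 ^ (L - 1) : Nat) : Int) := by push_cast; ring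
      _ ≤ (new_radix.natAbs : Int) := by exact_mod_cast h1
      _ = new_radix := h2
  have hL2 : 2 ≤ L := by
    by_contra hc
    have hle : L ≤ 1 := by omega
    have : (2 : Int) ^ L ≤ 2 ^ 1 := pvPowMono (by norm_num) hle
    simp at this
    omega
  have hblr : (2 : Int) ≤ (L : Int) := by exact_mod_cast hL2
  have hfd1 : PySem.Int.floordiv (bits + (L : Int) - 1) (L : Int)
      = (bits + (L : Int) - 1) / (L : Int) := PySem.Int.floordiv_eq_ediv_of_pos (by omega)
  have hfd2 : PySem.Int.floordiv (bits + (L : Int) - 2) ((L : Int) - 1)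
      = (bits + (L : Int) - 2) / ((L : Int) - 1) := PySem.Int.floordiv_eq_ediv_of_pos (by omega)
  simp only [hfd1, hfd2]
  set lo := (bits + (L : Int) - 1) / (L : Int) with hlodef
  set hi := (bits + (L : Int) - 2) / ((L : Int) - 1) with hhidef
  -- division decompositions
  have hdlo := Int.mul_ediv_add_emod (bits + (L : Int) - 1) (L : Int)
  have hrlo1 := Int.emod_nonneg (bits + (L : Int) - 1) (b := (L : Int)) (by omega)
  have hrlo2 := Int.emod_lt_of_pos (bits + (L : Int) - 1) (b := (L : Int)) (by omega)
  have hlo_ub : (L : Int) * lo ≤ bits + (L : Int) - 1 := by rw [hlodef]; linarith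
  have hlo_lb : bits ≤ (L : Int) * lo := by rw [hlodef]; linarith
  have hdhi := Int.mul_ediv_add_emod (bits + (L : Int) - 2) ((L : Int) - 1)
  have hrhi1 := Int.emod_nonneg (bits + (L : Int) - 2) (b := (L : Int) - 1) (by omega)
  have hrhi2 := Int.emod_lt_of_pos (bits + (L : Int) - 2) (b := (L : Int) - 1) (by omega)
  have hhi_lb : bits ≤ ((L : Int) - 1) * hi := by rw [hhidef]; linarith
  have hlo1 : 1 ≤ lo := by nlinarith
  have hhi1 : 1 ≤ hi := by nlinarith
  -- K + 1 ≤ hi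
  have hhicast : ((hi.toNat : Int)) = hi := Int.toNat_of_nonneg (by omega)
  have hKhi : (Nat.find hex : Int) + 1 ≤ hi := by
    have hexp : b ≤ (L - 1) * hi.toNat := by
      have hc : ((L - 1 : Nat) : Int) = (L : Int) - 1 := by omega
      have h3 : ((b : Nat) : Int) ≤ (((L - 1) * hi.toNat : Nat) : Int) := by
        rw [Nat.cast_mul, hc, hhicast, hbits]
        exact hhi_lb
      exact_mod_cast h3
    have hpowM : M ≤ new_radix ^ hi.toNat := by
      calc M = 2 ^ b := hMdef
        _ ≤ 2 ^ ((L - 1) * hi.toNat) := pvPowMono (by norm_num) hexp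
        _ = ((2 : Int) ^ (L - 1)) ^ hi.toNat := by rw [pow_mul]
        _ ≤ new_radix ^ hi.toNat := pow_le_pow_left₀ (by positivity) hlb _
    have hP : M ≤ new_radix ^ (hi.toNat - 1 + 1) := by
      have : hi.toNat - 1 + 1 = hi.toNat := by omega
      rw [this]; exact hpowM
    have := Nat.find_le (h := hex) hP
    omega
  -- lo ≤ K + 1
  have hlocast : ((lo.toNat : Int)) = lo := Int.toNat_of_nonneg (by omega)
  have hloK : lo ≤ (Nat.find hex : Int) + 1 := by
    by_cases hlo' : lo.toNat ≤ 1
    · omega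
    · have hfind : lo.toNat - 1 ≤ Nat.find hex := by
        rw [Nat.le_find_iff]
        intro m hm hPm
        -- m + 1 ≤ lo.toNat - 1; show new_radix ^ (m+1) < M
        have hmul_int : (L : Int) * (lo - 1) ≤ bits - 1 := by linarith
        have hmul : L * (lo.toNat - 1) ≤ b - 1 := by
          have hc1 : ((lo.toNat - 1 : Nat) : Int) = (lo.toNat : Int) - 1 := by omega
          have hc2 : ((b - 1 : Nat) : Int) = (b : Int) - 1 := by omega
          have h2 : ((L * (lo.toNat - 1) : Nat) : Int) ≤ ((b - 1 : Nat) : Int) := by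
            rw [Nat.cast_mul, hc1, hc2, hlocast, hbits]
            exact hmul_int
          exact_mod_cast h2
        have hle : L * (m + 1) ≤ b - 1 :=
          le_trans (Nat.mul_le_mul_left L (by omega)) hmul
        have : new_radix ^ (m + 1) < M := by
          calc new_radix ^ (m + 1) < ((2 : Int) ^ L) ^ (m + 1) :=
                pow_lt_pow_left₀ hub hrnn (by omega)
            _ = 2 ^ (L * (m + 1)) := by rw [pow_mul]
            _ ≤ 2 ^ (b - 1) := pvPowMono (by norm_num) hle
            _ < 2 ^ b := by
                have := pow_lt_pow_right₀ (a := (2 : Int)) (by norm_num) (m := b - 1) (n := b) (by omega)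
                exact this
        omega
      omega
  -- binary search
  have hwidth : hi - lo < 2 ^ (hi - lo).toNat := by
    have hge : lo ≤ hi := le_trans hloK hKhi
    have := Nat.lt_two_pow_self (n := (hi - lo).toNat)
    have hcast : (((hi - lo).toNat : Int)) < 2 ^ (hi - lo).toNat := by exact_mod_cast this
    omega
  have hB := binSearchB_eq new_radix M hr hex (hi - lo).toNat lo hi hlo1 hloK hKhi hwidth
  rw [hA, hB]
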